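-- pv_equiv track=rewrite | github.com/MrBrantCode/unitest_baseline | mut_generate/mist_train_taco/taco_7121/solution.py | can_be_sum_of_two_powers
-- ===== SOURCE A (Python) =====
-- def can_be_sum_of_two_powers(x, max_num=1000000, max_power=1000):
--     """
--     Checks if a number can be expressed as the sum of two perfect powers.
--
--     Args:
--     x (int): The number to check.
--     max_num (int, optional): The maximum possible value of the numbers to generate perfect powers. Defaults to 1000000.
--     max_power (int, optional): The maximum possible power for generating perfect powers. Defaults to 1000.
--
--     Returns:
--     bool: True if the number can be expressed as the sum of two perfect powers, False otherwise.
--     """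
--
--     # Initialize an array to store the perfect powers
--     P = [0] * (max_num + 1)
--
--     # Generate all perfect powers up to max_num
--     for i in range(2, max_power + 1):
--         j = 2
--         while int(pow(i, j)) <= max_num:
--             pos = int(pow(i, j))
--             P[pos] = 1
--             j += 1
--
--     # 1 is a perfect power (1^2)
--     P[1] = 1
--
--     # Check if x can be expressed as the sum of two perfect powers
--     for i in range(1, (x >> 1) + 1):
--         if P[i] and P[x - i]:
--             return True
--
--     return False
-- ===== SOURCE B (Python) =====
-- def can_be_sum_of_two_powers(x, max_num=1000000, max_power=1000):
--     """True iff x = p + q for perfect powers p, q (bases 2..max_power, exponents >= 2,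
--     values <= max_num; 1 counts as a perfect power). Generates powers only up to x-1
--     instead of sieving the whole range up to max_num."""
--     if x < 2:
--         return False
--     M = min(x - 1, max_num)
--     powers = {1}
--     i = 2
--     while i <= max_power and i * i <= M:
--         p = i * i
--         while p <= M:
--             powers.add(p)
--             p *= i
--         i += 1
--     half = x >> 1
--     return any(p <= half and (x - p) in powers for p in powers)
-- ===== Notes on version B (the rewrite author's own statement) =====
-- stated objective: faster
-- what changed: Instead of sieving a (max_num+1)-size array of all perfect powers up to max_num and scanning 1..x//2, B generates the perfect powers up to min(x-1, max_num) into a set (bases only up to its square root) and checks x-p membership for each generated power p.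
import Mathlib
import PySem

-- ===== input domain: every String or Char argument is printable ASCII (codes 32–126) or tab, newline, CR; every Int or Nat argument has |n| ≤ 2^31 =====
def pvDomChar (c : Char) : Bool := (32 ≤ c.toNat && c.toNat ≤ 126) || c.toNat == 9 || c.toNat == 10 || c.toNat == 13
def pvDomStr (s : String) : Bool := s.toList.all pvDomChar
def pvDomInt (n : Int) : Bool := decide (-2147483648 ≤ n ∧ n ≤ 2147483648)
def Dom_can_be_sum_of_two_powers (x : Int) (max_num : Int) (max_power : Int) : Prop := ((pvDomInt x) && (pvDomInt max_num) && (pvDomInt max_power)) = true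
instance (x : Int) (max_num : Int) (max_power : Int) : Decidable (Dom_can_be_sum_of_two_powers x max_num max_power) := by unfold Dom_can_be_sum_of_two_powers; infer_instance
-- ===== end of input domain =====

-- B re-implements A by generating perfect powers only up to min(x-1, max_num) instead of
-- sieving an array of size max_num+1; equivalence of the return value is proved on Pre_.

-- ===== PORT A =====
-- inner while loop of A: `while int(pow(i, j)) <= max_num: P[pos] = 1; j += 1`
-- (fuel only makes the recursion total; on every call A makes the fuel is sufficient, see pvAInner_getD)
def pvAInner (maxNum i : Int) : Nat → Int → List Int → List Int
  | 0, _, P => P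
  | fuel + 1, j, P =>
    if i ^ j.toNat ≤ maxNum then
      pvAInner maxNum i fuel (j + 1) (PySem.List.pySetD P (i ^ j.toNat) 1)
    else P

def can_be_sum_of_two_powers (x : Int) (max_num : Int) (max_power : Int) : Bool :=
  -- P = [0] * (max_num + 1)
  let P0 : List Int := List.replicate (max_num + 1).toNat 0
  -- for i in range(2, max_power + 1): inner while loop
  let P1 := (PySem.List.pyRange 2 (max_power + 1) 1).foldl
    (fun P i => pvAInner max_num i (max_num.toNat + 1) 2 P) P0
  -- P[1] = 1
  let P := PySem.List.pySetD P1 1 1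
  -- for i in range(1, (x >> 1) + 1): if P[i] and P[x - i]: return True
  (PySem.List.pyRange 1 ((x >>> (1:Nat)) + 1) 1).any
    (fun i => PySem.List.pyGetD P i 0 != 0 && PySem.List.pyGetD P (x - i) 0 != 0)

-- ===== PORT B =====
-- inner while loop of B: `while p <= M: powers.add(p); p *= i`  (fuel is sufficient on every call B makes)
def pvBInner (M i : Int) : Nat → Int → PySem.Set Int → PySem.Set Int
  | 0, _, s => s
  | fuel + 1, p, s =>
    if p ≤ M then pvBInner M i fuel (p * i) (PySem.Set.add s p) else s

-- outer while loop of B: `while i <= max_power and i * i <= M: …; i += 1`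
def pvBOuter (M mp : Int) : Nat → Int → PySem.Set Int → PySem.Set Int
  | 0, _, s => s
  | fuel + 1, i, s =>
    if i ≤ mp ∧ i * i ≤ M then
      pvBOuter M mp fuel (i + 1) (pvBInner M i (M.toNat + 1) (i * i) s)
    else s

def can_be_sum_of_two_powers_alt (x : Int) (max_num : Int) (max_power : Int) : Bool :=
  if x < 2 then false
  else
    let M := min (x - 1) max_num
    let s := pvBOuter M max_power (M.toNat + 1) 2 (PySem.Set.ofList [1])
    let half := x >>> (1:Nat)
    s.any (fun p => decide (p ≤ half) && PySem.Set.contains s (x - p))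

-- ===== PRECONDITION & SPEC =====
-- Pre_ excludes exactly the inputs where A raises IndexError: max_num ≤ 0 (P[1] = 1 is out of
-- range) and x ≥ max_num + 2 (P[x - 1] is out of range, reached at i = 1 since P[1] is set).
def Pre_can_be_sum_of_two_powers (x : Int) (max_num : Int) (max_power : Int) : Prop :=
  1 ≤ max_num ∧ x ≤ max_num + 1
instance (x : Int) (max_num : Int) (max_power : Int) : Decidable (Pre_can_be_sum_of_two_powers x max_num max_power) := by unfold Pre_can_be_sum_of_two_powers; infer_instance

def pvWitness_can_be_sum_of_two_powers : Int × Int × Int := (5, 10, 10)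

def Spec_can_be_sum_of_two_powers (x : Int) (max_num : Int) (max_power : Int) (out : Bool) : Prop := out = can_be_sum_of_two_powers_alt x max_num max_power
instance (x : Int) (max_num : Int) (max_power : Int) (out : Bool) : Decidable (Spec_can_be_sum_of_two_powers x max_num max_power out) := by unfold Spec_can_be_sum_of_two_powers; infer_instance

-- ===== CLAIM (what is proved, stated in full; the proofs are below) =====
def Claim_equal_can_be_sum_of_two_powers : Prop := ∀ (x : Int) (max_num : Int) (max_power : Int), Dom_can_be_sum_of_two_powers x max_num max_power → Pre_can_be_sum_of_two_powers x max_num max_power → Spec_can_be_sum_of_two_powers x max_num max_power (can_be_sum_of_two_powers x max_num max_power)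

-- ===== LEMMAS AND PROOFS =====

-- the perfect powers A's sieve marks (value ≤ max_num, base in 2..max_power, exponent ≥ 2), plus 1
def PPa (mn mp k : Int) : Prop :=
  k = 1 ∨ ∃ a : Int, 2 ≤ a ∧ a ≤ mp ∧ ∃ t : Nat, a ^ (2 + t) = k ∧ k ≤ mn

-- the perfect powers B collects (value ≤ M, base in 2..max_power with a·a ≤ M), plus 1
def PPb (M mp y : Int) : Prop :=
  y = 1 ∨ ∃ a : Int, 2 ≤ a ∧ a ≤ mp ∧ a * a ≤ M ∧ ∃ t : Nat, a ^ (2 + t) = y ∧ y ≤ M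

lemma int_shiftRight_one (x : Int) : x >>> (1:Nat) = x / 2 := by
  rcases x with m | m
  · have h : Int.ofNat m >>> (1:Nat) = Int.ofNat (m >>> 1) := rfl
    rw [h, Nat.shiftRight_succ, Nat.shiftRight_zero]
    show ((m / 2 : Nat) : Int) = (m : Int) / 2
    omega
  · have h : Int.negSucc m >>> (1:Nat) = Int.negSucc (m >>> 1) := rfl
    rw [h, Nat.shiftRight_succ, Nat.shiftRight_zero]
    rw [Int.negSucc_eq, Int.negSucc_eq]
    omega

lemma getD_set_eq (l : List Int) (n k : Nat) (v : Int) :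
    (l.set n v).getD k 0 = if k = n ∧ n < l.length then v else l.getD k 0 := by
  simp [List.getD, List.getElem?_set]
  split_ifs <;> simp_all <;> omega

lemma getD_replicate_zero (n k : Nat) : (List.replicate n (0:Int)).getD k 0 = 0 := by
  rcases Nat.lt_or_ge k n with h | h
  · simp [List.getD, List.getElem?_replicate, h]
  · simp [List.getD, List.getElem?_eq_none (show (List.replicate n (0:Int)).length ≤ k by simpa using h)]

lemma pow_big (mn a : Int) (n : Nat) (h : mn.toNat < n) (ha : 2 ≤ a) : mn < a ^ n := by
  have h1 : (mn : Int) ≤ mn.toNat := Int.self_le_toNat mn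
  have h2 : mn.toNat < 2 ^ n := h.trans Nat.lt_two_pow_self
  have h3 : ((mn.toNat : Int)) < (2:Int) ^ n := by exact_mod_cast h2
  have h4 : (2:Int) ^ n ≤ a ^ n := pow_le_pow_left₀ (by omega) ha n
  calc mn ≤ (mn.toNat : Int) := h1
    _ < (2:Int) ^ n := h3
    _ ≤ a ^ n := h4

lemma pow_mono_exp (a : Int) (ha : 1 ≤ a) {m n : Nat} (h : m ≤ n) : a ^ m ≤ a ^ n :=
  pow_le_pow_right₀ ha h

lemma pvAInner_length (mn i : Int) :
    ∀ (fuel : Nat) (j : Int) (P : List Int), (pvAInner mn i fuel j P).length = P.length := by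
  intro fuel
  induction fuel with
  | zero => intro j P; rfl
  | succ f ih =>
    intro j P
    simp only [pvAInner]
    split
    · rw [ih]; exact PySem.List.length_pySetD _ _ _
    · rfl

lemma pvAInner_ne (mn i : Int) (hi : 2 ≤ i) (hmn : 0 ≤ mn) :
    ∀ (fuel jn : Nat) (P : List Int), P.length = (mn + 1).toNat → mn < i ^ (jn + fuel) →
      ∀ k : Nat, ((pvAInner mn i fuel ((jn : Nat) : Int) P).getD k 0 ≠ 0
        ↔ (∃ t : Nat, i ^ (jn + t) = (k : Int) ∧ (k : Int) ≤ mn) ∨ P.getD k 0 ≠ 0) := by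
  intro fuel
  induction fuel with
  | zero =>
    intro jn P hP hfuel k
    simp only [Nat.add_zero] at hfuel
    simp only [pvAInner]
    constructor
    · exact Or.inr
    · rintro (⟨t, ht, hk⟩ | h)
      · exfalso
        have : i ^ jn ≤ i ^ (jn + t) := pow_mono_exp i (by omega) (Nat.le_add_right _ _)
        omega
      · exact h
  | succ f ih =>
    intro jn P hP hfuel k
    simp only [pvAInner, Int.toNat_natCast]
    split
    next hcond =>
      have hjcast : ((jn : Int) + 1) = (((jn + 1 : Nat)) : Int) := by push_cast; ring
      have hpow_nonneg : (0:Int) ≤ i ^ jn := pow_nonneg (by omega) jn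
      have hposval : ((i ^ jn).toNat : Int) = i ^ jn := Int.toNat_of_nonneg hpow_nonneg
      have hsetD : PySem.List.pySetD P (i ^ jn) 1 = P.set (i ^ jn).toNat 1 := by
        conv_lhs => rw [← hposval]
        rw [PySem.List.pySetD_natCast]
      have hposlt : (i ^ jn).toNat < P.length := by rw [hP]; omega
      rw [hjcast, hsetD, ih (jn + 1) _ (by rw [List.length_set]; exact hP)
        (by rw [show jn + 1 + f = jn + (f + 1) by omega]; exact hfuel) k]
      rw [getD_set_eq]
      by_cases hk : k = (i ^ jn).toNat
      · subst hk
        rw [if_pos ⟨rfl, hposlt⟩]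
        constructor
        · intro _
          exact Or.inl ⟨0, by rw [Nat.add_zero]; exact hposval.symm, by rw [hposval]; exact hcond⟩
        · intro _
          exact Or.inr one_ne_zero
      · rw [if_neg (fun hc => hk hc.1)]
        have hkne : (k : Int) ≠ i ^ jn := by
          intro h; apply hk; rw [← h, Int.toNat_natCast]
        constructor
        · rintro (⟨t, ht, hle⟩ | h)
          · exact Or.inl ⟨t + 1, by rw [show jn + (t + 1) = jn + 1 + t by omega]; exact ht, hle⟩
          · exact Or.inr h
        · rintro (⟨t, ht, hle⟩ | h)
          · rcases t with _ | t'
            · rw [Nat.add_zero] at ht; exact absurd ht hkne.symm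
            · exact Or.inl ⟨t', by rw [show jn + 1 + t' = jn + (t' + 1) by omega]; exact ht, hle⟩
          · exact Or.inr h
    next hcond =>
      constructor
      · exact Or.inr
      · rintro (⟨t, ht, hk⟩ | h)
        · exfalso
          have : i ^ jn ≤ i ^ (jn + t) := pow_mono_exp i (by omega) (Nat.le_add_right _ _)
          omega
        · exact h

lemma pvAfold_ne (mn : Int) (hmn : 0 ≤ mn) :
    ∀ (L : List Int), (∀ a ∈ L, 2 ≤ a) → ∀ (P : List Int), P.length = (mn + 1).toNat →
      (∀ k : Nat, ((L.foldl (fun P i => pvAInner mn i (mn.toNat + 1) 2 P) P).getD k 0 ≠ 0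
        ↔ (∃ a ∈ L, ∃ t : Nat, a ^ (2 + t) = (k : Int) ∧ (k : Int) ≤ mn) ∨ P.getD k 0 ≠ 0))
      ∧ (L.foldl (fun P i => pvAInner mn i (mn.toNat + 1) 2 P) P).length = P.length := by
  intro L
  induction L with
  | nil => intro _ P hP; exact ⟨fun k => by simp, rfl⟩
  | cons a L ihL =>
    intro hL P hP
    have ha : 2 ≤ a := hL a (by simp)
    have h2 : (((2:Nat)) : Int) = (2 : Int) := by norm_num
    have hinner := pvAInner_ne mn a ha hmn (mn.toNat + 1) 2 P hP
      (pow_big mn a _ (by omega) ha)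
    rw [h2] at hinner
    have hlen : (pvAInner mn a (mn.toNat + 1) 2 P).length = (mn + 1).toNat := by
      rw [pvAInner_length]; exact hP
    obtain ⟨ihk, ihlen⟩ := ihL (fun b hb => hL b (List.mem_cons_of_mem _ hb)) _ hlen
    refine ⟨fun k => ?_, ?_⟩
    · simp only [List.foldl_cons]
      rw [ihk k, hinner k]
      constructor
      · rintro (⟨b, hb, hbt⟩ | (hat | h))
        · exact Or.inl ⟨b, List.mem_cons_of_mem _ hb, hbt⟩
        · exact Or.inl ⟨a, by simp, hat⟩
        · exact Or.inr h
      · rintro (⟨b, hb, hbt⟩ | h)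
        · rcases List.mem_cons.mp hb with rfl | hb'
          · exact Or.inr (Or.inl hbt)
          · exact Or.inl ⟨b, hb', hbt⟩
        · exact Or.inr (Or.inr h)
    · simp only [List.foldl_cons]
      rw [ihlen, hlen, hP]

-- characterization of A's final array P: for 0 ≤ k ≤ mn, P[k] is nonzero iff PPa
lemma pvA_array_ne (mn mp : Int) (hmn : 1 ≤ mn) (k : Nat) (hk : (k : Int) ≤ mn) :
    (PySem.List.pySetD
      ((PySem.List.pyRange 2 (mp + 1) 1).foldl
        (fun P i => pvAInner mn i (mn.toNat + 1) 2 P) (List.replicate (mn + 1).toNat 0)) 1 1).getD k 0 ≠ 0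
      ↔ PPa mn mp (k : Int) := by
  have hrep : (List.replicate (mn + 1).toNat (0:Int)).length = (mn + 1).toNat := List.length_replicate
  have hrange : ∀ a ∈ PySem.List.pyRange 2 (mp + 1) 1, 2 ≤ a := by
    intro a ha; exact (PySem.List.mem_pyRange_one.mp ha).1
  obtain ⟨hchar, hlen⟩ := pvAfold_ne mn (by omega) _ hrange _ hrep
  have hset : PySem.List.pySetD
      ((PySem.List.pyRange 2 (mp + 1) 1).foldl (fun P i => pvAInner mn i (mn.toNat + 1) 2 P)
        (List.replicate (mn + 1).toNat 0)) 1 1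
      = ((PySem.List.pyRange 2 (mp + 1) 1).foldl (fun P i => pvAInner mn i (mn.toNat + 1) 2 P)
        (List.replicate (mn + 1).toNat 0)).set 1 1 := by
    rw [show (1:Int) = (((1:Nat)) : Int) by norm_num, PySem.List.pySetD_natCast]
  rw [hset, getD_set_eq, hlen, hrep]
  by_cases hk1 : k = 1
  · subst hk1
    rw [if_pos ⟨rfl, by omega⟩]
    constructor
    · intro _; exact Or.inl (by norm_num)
    · intro _; exact one_ne_zero
  · rw [if_neg (fun hc => hk1 hc.1), hchar k, getD_replicate_zero]
    constructor
    · rintro (⟨a, ha, ht⟩ | h)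
      · exact Or.inr ⟨a, (PySem.List.mem_pyRange_one.mp ha).1,
          by have := (PySem.List.mem_pyRange_one.mp ha).2; omega, ht⟩
      · exact absurd rfl h
    · rintro (h1 | ⟨a, ha2, hamp, ht⟩)
      · exact absurd (by exact_mod_cast h1 : k = 1) hk1
      · exact Or.inl ⟨a, PySem.List.mem_pyRange_one.mpr ⟨ha2, by omega⟩, ht⟩

-- characterization of A's result
lemma pvA_char (x mn mp : Int) (hmn : 1 ≤ mn) (hx : x ≤ mn + 1) :
    can_be_sum_of_two_powers x mn mp = true
      ↔ ∃ i : Int, 1 ≤ i ∧ i ≤ x >>> (1:Nat) ∧ PPa mn mp i ∧ PPa mn mp (x - i) := by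
  unfold can_be_sum_of_two_powers
  simp only [List.any_eq_true, Bool.and_eq_true, bne_iff_ne]
  constructor
  · rintro ⟨i, hmem, hp1, hp2⟩
    obtain ⟨hi1, hi2⟩ := PySem.List.mem_pyRange_one.mp hmem
    have hh : x >>> (1:Nat) = x / 2 := int_shiftRight_one x
    have hx2 : 2 ≤ x := by omega
    obtain ⟨n1, rfl⟩ : ∃ n : Nat, i = (n : Int) := ⟨i.toNat, (Int.toNat_of_nonneg (by omega)).symm⟩
    obtain ⟨n2, hn2⟩ : ∃ n : Nat, x - (n1 : Int) = (n : Int) :=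
      ⟨(x - n1).toNat, (Int.toNat_of_nonneg (by omega)).symm⟩
    rw [hn2] at hp2
    rw [PySem.List.pyGetD_natCast] at hp1 hp2
    rw [pvA_array_ne mn mp hmn n1 (by omega)] at hp1
    rw [pvA_array_ne mn mp hmn n2 (by omega)] at hp2
    exact ⟨n1, by omega, by omega, hp1, by rw [hn2]; exact hp2⟩
  · rintro ⟨i, hi1, hi2, hp1, hp2⟩
    have hh : x >>> (1:Nat) = x / 2 := int_shiftRight_one x
    have hx2 : 2 ≤ x := by omega
    refine ⟨i, PySem.List.mem_pyRange_one.mpr ⟨hi1, by omega⟩, ?_, ?_⟩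
    · obtain ⟨n1, rfl⟩ : ∃ n : Nat, i = (n : Int) := ⟨i.toNat, (Int.toNat_of_nonneg (by omega)).symm⟩
      rw [PySem.List.pyGetD_natCast, pvA_array_ne mn mp hmn n1 (by omega)]
      exact hp1
    · obtain ⟨n2, hn2⟩ : ∃ n : Nat, x - i = (n : Int) :=
        ⟨(x - i).toNat, (Int.toNat_of_nonneg (by omega)).symm⟩
      rw [hn2] at hp2 ⊢
      rw [PySem.List.pyGetD_natCast, pvA_array_ne mn mp hmn n2 (by omega)]
      exact hp2

lemma pvBInner_mem (M i : Int) (hi : 2 ≤ i) :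
    ∀ (fuel : Nat) (p : Int), 1 ≤ p → M < p * i ^ fuel →
      ∀ (s : PySem.Set Int) (y : Int),
        y ∈ pvBInner M i fuel p s ↔ y ∈ s ∨ ∃ t : Nat, p * i ^ t = y ∧ y ≤ M := by
  intro fuel
  induction fuel with
  | zero =>
    intro p hp hfuel s y
    simp only [pvBInner]
    constructor
    · exact Or.inl
    · rintro (h | ⟨t, ht, hy⟩)
      · exact h
      · exfalso
        have h1 : (1:Int) ≤ i ^ t := one_le_pow₀ (by omega)
        have : p ≤ p * i ^ t := le_mul_of_one_le_right (by omega) h1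
        simp only [pow_zero, mul_one] at hfuel
        linarith
  | succ f ih =>
    intro p hp hfuel s y
    simp only [pvBInner]
    split
    next hcond =>
      rw [ih (p * i) (by nlinarith) (by
        have hq : p * i * i ^ f = p * i ^ (f + 1) := by rw [pow_succ']; ring
        rw [hq]; exact hfuel) _ y]
      rw [PySem.Set.mem_add]
      constructor
      · rintro ((h | h) | ⟨t, ht, hy⟩)
        · exact Or.inl h
        · exact Or.inr ⟨0, by rw [pow_zero, mul_one]; exact h.symm, by omega⟩
        · exact Or.inr ⟨t + 1, by rw [← ht, pow_succ']; ring, hy⟩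
      · rintro (h | ⟨t, ht, hy⟩)
        · exact Or.inl (Or.inl h)
        · rcases t with _ | t'
          · rw [pow_zero, mul_one] at ht; exact Or.inl (Or.inr ht.symm)
          · exact Or.inr ⟨t', by rw [← ht, pow_succ']; ring, hy⟩
    next hcond =>
      constructor
      · exact Or.inl
      · rintro (h | ⟨t, ht, hy⟩)
        · exact h
        · exfalso
          have h1 : (1:Int) ≤ i ^ t := one_le_pow₀ (by omega)
          have : p ≤ p * i ^ t := le_mul_of_one_le_right (by omega) h1
          linarith

lemma pvBOuter_mem (M mp : Int) :
    ∀ (fuel : Nat) (i : Int), 2 ≤ i → M < i + fuel →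
      ∀ (s : PySem.Set Int) (y : Int),
        y ∈ pvBOuter M mp fuel i s
          ↔ y ∈ s ∨ ∃ a : Int, i ≤ a ∧ a ≤ mp ∧ a * a ≤ M ∧ ∃ t : Nat, a * a * a ^ t = y ∧ y ≤ M := by
  intro fuel
  induction fuel with
  | zero =>
    intro i hi hfuel s y
    simp only [pvBOuter]
    constructor
    · exact Or.inl
    · rintro (h | ⟨a, hia, hamp, haa, _⟩)
      · exact h
      · exfalso
        have h2a : 2 ≤ a := by omega
        have : 2 * a ≤ a * a := by nlinarith
        simp only [Nat.cast_zero, add_zero] at hfuel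
        linarith
  | succ f ih =>
    intro i hi hfuel s y
    simp only [pvBOuter]
    split
    next hcond =>
      obtain ⟨himp, hiiM⟩ := hcond
      rw [ih (i + 1) (by omega) (by push_cast; push_cast at hfuel; omega) _ y]
      rw [pvBInner_mem M i hi (M.toNat + 1) (i * i) (by nlinarith)
        (by
          have hq : i * i * i ^ (M.toNat + 1) = i ^ (M.toNat + 3) := by ring
          rw [hq]; exact pow_big M i _ (by omega) hi) s y]
      constructor
      · rintro ((h | ⟨t, ht, hy⟩) | ⟨a, hia, hamp, haa, ht⟩)
        · exact Or.inl h
        · exact Or.inr ⟨i, le_refl i, himp, hiiM, t, ht, hy⟩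
        · exact Or.inr ⟨a, by omega, hamp, haa, ht⟩
      · rintro (h | ⟨a, hia, hamp, haa, t, ht, hy⟩)
        · exact Or.inl (Or.inl h)
        · rcases eq_or_lt_of_le hia with rfl | hlt
          · exact Or.inl (Or.inr ⟨t, ht, hy⟩)
          · exact Or.inr ⟨a, by omega, hamp, haa, t, ht, hy⟩
    next hcond =>
      constructor
      · exact Or.inl
      · rintro (h | ⟨a, hia, hamp, haa, _⟩)
        · exact h
        · exfalso
          apply hcond
          constructor
          · omega
          · have : i * i ≤ a * a := by nlinarith
            omega

-- characterization of the set B builds: exactly PPb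
lemma pvB_set_char (M mp y : Int) :
    y ∈ pvBOuter M mp (M.toNat + 1) 2 (PySem.Set.ofList [1]) ↔ PPb M mp y := by
  rw [pvBOuter_mem M mp (M.toNat + 1) 2 (by norm_num) (by omega)]
  unfold PPb
  constructor
  · rintro (h | ⟨a, h2a, hamp, haa, t, ht, hy⟩)
    · left; simpa using h
    · right
      exact ⟨a, h2a, hamp, haa, t, by rw [← ht, pow_add]; ring, hy⟩
  · rintro (h | ⟨a, h2a, hamp, haa, t, ht, hy⟩)
    · left; rw [PySem.Set.mem_ofList]; simp [h]
    · right
      exact ⟨a, h2a, hamp, haa, t, by rw [← ht, pow_add]; ring, hy⟩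

lemma PPb_pos (M mp y : Int) (h : PPb M mp y) : 1 ≤ y := by
  rcases h with h1 | ⟨a, h2a, _, _, t, ht, _⟩
  · omega
  · have : (0:Int) < a ^ (2 + t) := pow_pos (by omega) _
    omega

lemma PPa_iff_PPb (mn mp k x : Int) (hmn : x - 1 ≤ mn) (hk : k ≤ x - 1) :
    PPa mn mp k ∧ k ≤ x - 1 ↔ PPb (x - 1) mp k := by
  unfold PPa PPb
  constructor
  · rintro ⟨h1 | ⟨a, h2a, hamp, t, ht, hkmn⟩, hkx⟩
    · exact Or.inl h1
    · right
      refine ⟨a, h2a, hamp, ?_, t, ht, hkx⟩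
      have h2 : a * a = a ^ 2 := by ring
      have h3 : a ^ 2 ≤ a ^ (2 + t) := pow_mono_exp a (by omega) (Nat.le_add_right _ _)
      omega
  · rintro (h1 | ⟨a, h2a, hamp, _, t, ht, hkx⟩)
    · exact ⟨Or.inl h1, hk⟩
    · exact ⟨Or.inr ⟨a, h2a, hamp, t, ht, by omega⟩, hkx⟩

-- characterization of B's result (for x ≥ 2)
lemma pvB_char (x mn mp : Int) (hx : 2 ≤ x) :
    can_be_sum_of_two_powers_alt x mn mp = true
      ↔ ∃ p : Int, PPb (min (x - 1) mn) mp p ∧ p ≤ x >>> (1:Nat) ∧ PPb (min (x - 1) mn) mp (x - p) := by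
  unfold can_be_sum_of_two_powers_alt
  rw [if_neg (by omega)]
  simp only [List.any_eq_true, Bool.and_eq_true, decide_eq_true_eq]
  constructor
  · rintro ⟨p, hmem, hle, hcont⟩
    rw [pvB_set_char] at hmem
    rw [PySem.Set.contains_iff, pvB_set_char] at hcont
    exact ⟨p, hmem, hle, hcont⟩
  · rintro ⟨p, hp, hle, hxp⟩
    refine ⟨p, ?_, hle, ?_⟩
    · rw [← pvB_set_char (min (x - 1) mn) mp p] at hp; exact hp
    · rw [PySem.Set.contains_iff, pvB_set_char]; exact hxp

-- ===== VERDICT (by name: the statement is the Claim_ definition above) =====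
theorem can_be_sum_of_two_powers_spec : Claim_equal_can_be_sum_of_two_powers := by
  intro x mn mp hdom hpre
  obtain ⟨hmn, hxmn⟩ := hpre
  unfold Spec_can_be_sum_of_two_powers
  have hsr : x >>> (1:Nat) = x / 2 := int_shiftRight_one x
  by_cases hx : x < 2
  · unfold can_be_sum_of_two_powers can_be_sum_of_two_powers_alt
    rw [if_pos hx, hsr]
    rw [PySem.List.pyRange_one_eq_nil (show x / 2 + 1 ≤ 1 by omega)]
    rfl
  · push_neg at hx
    have hM : min (x - 1) mn = x - 1 := by omega
    rw [Bool.eq_iff_iff, pvA_char x mn mp hmn hxmn, pvB_char x mn mp hx, hM, hsr]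
    constructor
    · rintro ⟨i, hi1, hi2, hp1, hp2⟩
      refine ⟨i, ?_, hi2, ?_⟩
      · exact (PPa_iff_PPb mn mp i x (by omega) (by omega)).mp ⟨hp1, by omega⟩
      · exact (PPa_iff_PPb mn mp (x - i) x (by omega) (by omega)).mp ⟨hp2, by omega⟩
    · rintro ⟨p, hp, hple, hxp⟩
      have hp1 : 1 ≤ p := PPb_pos _ _ _ hp
      refine ⟨p, hp1, hple, ?_, ?_⟩
      · exact ((PPa_iff_PPb mn mp p x (by omega) (by omega)).mpr hp).1
      · exact ((PPa_iff_PPb mn mp (x - p) x (by omega) (by omega)).mpr hxp).1
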